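-- pv_equiv track=rewrite | github.com/CaCC-Lab/difyops | dify_admin/env_diff.py | _compare_resources
-- ===== SOURCE A (Python) =====
-- from typing import Any
--
-- def _resource_summary(r: dict[str, Any]) -> dict[str, str]:
--     """Extract summary fields from a resource."""
--     return {"name": r.get("name", ""), "id": r.get("id", ""), "mode": r.get("mode", "")}
--
-- def _compare_resources(
--     source_list: list[dict[str, Any]],
--     target_list: list[dict[str, Any]],
-- ) -> dict[str, list[dict[str, Any]]]:
--     """Compare two lists of resources by name."""
--     source_by_name = {r.get("name", ""): r for r in source_list}
--     target_by_name = {r.get("name", ""): r for r in target_list}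
--
--     source_names = set(source_by_name.keys())
--     target_names = set(target_by_name.keys())
--
--     source_only = [
--         _resource_summary(source_by_name[n]) for n in sorted(source_names - target_names)
--     ]
--     target_only = [
--         _resource_summary(target_by_name[n]) for n in sorted(target_names - source_names)
--     ]
--     common = [
--         {
--             "name": n,
--             "source_id": source_by_name[n].get("id", ""),
--             "target_id": target_by_name[n].get("id", ""),
--             "mode": source_by_name[n].get("mode", ""),
--         }
--         for n in sorted(source_names & target_names)
--     ]
--
--     return {
--         "source_only": source_only,
--         "target_only": target_only,
--         "common": common,
--     }
-- ===== SOURCE B (Python) =====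
-- def _resource_summary(r):
--     return {"name": r.get("name", ""), "id": r.get("id", ""), "mode": r.get("mode", "")}
--
-- def _compare_resources(source_list, target_list):
--     source_by_name = {r.get("name", ""): r for r in source_list}
--     target_by_name = {r.get("name", ""): r for r in target_list}
--     source_only, target_only, common = [], [], []
--     for n in sorted(source_by_name.keys() | target_by_name.keys()):
--         s = source_by_name.get(n)
--         t = target_by_name.get(n)
--         if s is not None and t is not None:
--             common.append({
--                 "name": n,
--                 "source_id": s.get("id", ""),
--                 "target_id": t.get("id", ""),
--                 "mode": s.get("mode", ""),
--             })
--         elif s is not None: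
--             source_only.append(_resource_summary(s))
--         else:
--             target_only.append(_resource_summary(t))
--     return {"source_only": source_only, "target_only": target_only, "common": common}
-- ===== Notes on version B (the rewrite author's own statement) =====
-- stated objective: alternative
-- what changed: A sorts three separate set differences/intersection and builds each output list in its own comprehension; B sorts the union of names once and classifies each name into one of the three lists in a single pass with dict lookups.
import Mathlib
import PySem

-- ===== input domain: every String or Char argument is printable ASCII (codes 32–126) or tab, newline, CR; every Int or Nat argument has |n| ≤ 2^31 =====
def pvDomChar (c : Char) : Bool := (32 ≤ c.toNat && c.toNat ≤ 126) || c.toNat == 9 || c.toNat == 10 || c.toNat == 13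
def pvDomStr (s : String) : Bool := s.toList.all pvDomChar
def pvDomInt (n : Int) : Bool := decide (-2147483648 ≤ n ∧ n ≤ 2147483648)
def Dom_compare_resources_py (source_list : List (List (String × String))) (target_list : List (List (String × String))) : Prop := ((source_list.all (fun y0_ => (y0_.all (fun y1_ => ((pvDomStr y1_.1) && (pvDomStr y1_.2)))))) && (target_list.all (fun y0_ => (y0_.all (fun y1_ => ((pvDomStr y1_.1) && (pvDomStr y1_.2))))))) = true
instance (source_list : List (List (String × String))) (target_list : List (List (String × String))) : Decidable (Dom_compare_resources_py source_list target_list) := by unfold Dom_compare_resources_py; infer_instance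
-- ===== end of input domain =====

-- B replaces A's three sorted set differences/intersection and three comprehensions by ONE
-- sorted union of the names and a single classification pass (objective: alternative decomposition).

-- ===== PORT A =====
-- r.get(k, dflt) on a resource dict (assoc list, first match)
def pyRget (r : List (String × String)) (k dflt : String) : String :=
  match r.find? (fun p => p.1 == k) with
  | some p => p.2
  | none => dflt

-- _resource_summary
def resourceSummary (r : List (String × String)) : List (String × String) :=
  [("name", pyRget r "name" ""), ("id", pyRget r "id" ""), ("mode", pyRget r "mode" "")]

-- {r.get("name", ""): r for r in lst}  (shared verbatim by A and Source B)
def byName (lst : List (List (String × String))) : PySem.Dict String (List (String × String)) :=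
  lst.foldl (fun d r => d.insert (pyRget r "name" "") r) PySem.Dict.empty

def compare_resources_py (source_list : List (List (String × String))) (target_list : List (List (String × String))) : List (String × List (List (String × String))) :=
  let source_by_name := byName source_list
  let target_by_name := byName target_list
  let source_names : PySem.Set String := PySem.Set.ofList source_by_name.keys
  let target_names : PySem.Set String := PySem.Set.ofList target_by_name.keys
  let source_only := (PySem.List.sorted (PySem.Set.diff source_names target_names) (fun x => x) false).map
    (fun n => resourceSummary (source_by_name.getD n []))
  let target_only := (PySem.List.sorted (PySem.Set.diff target_names source_names) (fun x => x) false).map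
    (fun n => resourceSummary (target_by_name.getD n []))
  let common := (PySem.List.sorted (PySem.Set.inter source_names target_names) (fun x => x) false).map
    (fun n => [("name", n),
               ("source_id", pyRget (source_by_name.getD n []) "id" ""),
               ("target_id", pyRget (target_by_name.getD n []) "id" ""),
               ("mode", pyRget (source_by_name.getD n []) "mode" "")])
  [("source_only", source_only), ("target_only", target_only), ("common", common)]

-- ===== PORT B =====
-- the loop body of Source B: classify one name into (source_only, target_only, common)
def classifyStep (sbn tbn : PySem.Dict String (List (String × String)))
    (acc : List (List (String × String)) × List (List (String × String)) × List (List (String × String)))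
    (n : String) :
    List (List (String × String)) × List (List (String × String)) × List (List (String × String)) :=
  match sbn.get? n, tbn.get? n with
  | some s, some t =>
      (acc.1, acc.2.1, acc.2.2 ++ [[("name", n), ("source_id", pyRget s "id" ""), ("target_id", pyRget t "id" ""), ("mode", pyRget s "mode" "")]])
  | some s, none => (acc.1 ++ [resourceSummary s], acc.2.1, acc.2.2)
  | none, some t => (acc.1, acc.2.1 ++ [resourceSummary t], acc.2.2)
  | none, none => acc

def compare_resources_py_alt (source_list : List (List (String × String))) (target_list : List (List (String × String))) : List (String × List (List (String × String))) :=
  let source_by_name := byName source_list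
  let target_by_name := byName target_list
  let names := PySem.List.sorted (PySem.Set.union (PySem.Set.ofList source_by_name.keys) target_by_name.keys) (fun x => x) false
  let res := names.foldl (classifyStep source_by_name target_by_name) ([], [], [])
  [("source_only", res.1), ("target_only", res.2.1), ("common", res.2.2)]

-- ===== PRECONDITION & SPEC =====
def Spec_compare_resources_py (source_list : List (List (String × String))) (target_list : List (List (String × String))) (out : List (String × List (List (String × String)))) : Prop := out = compare_resources_py_alt source_list target_list
instance (source_list : List (List (String × String))) (target_list : List (List (String × String))) (out : List (String × List (List (String × String)))) : Decidable (Spec_compare_resources_py source_list target_list out) := by unfold Spec_compare_resources_py; infer_instance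

-- ===== CLAIM (what is proved, stated in full; the proofs are below) =====
def Claim_equal_compare_resources_py : Prop := ∀ (source_list : List (List (String × String))) (target_list : List (List (String × String))), Dom_compare_resources_py source_list target_list → Spec_compare_resources_py source_list target_list (compare_resources_py source_list target_list)

-- ===== LEMMAS AND PROOFS =====

-- the classification loop is three filter-and-maps over the traversed names
theorem foldl_classifyStep (sbn tbn : PySem.Dict String (List (String × String)))
    (ns : List String) (a b c : List (List (String × String))) :
    ns.foldl (classifyStep sbn tbn) (a, b, c) =
      (a ++ (ns.filter (fun n => (sbn.get? n).isSome && !(tbn.get? n).isSome)).map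
              (fun n => resourceSummary (sbn.getD n [])),
       b ++ (ns.filter (fun n => !(sbn.get? n).isSome && (tbn.get? n).isSome)).map
              (fun n => resourceSummary (tbn.getD n [])),
       c ++ (ns.filter (fun n => (sbn.get? n).isSome && (tbn.get? n).isSome)).map
              (fun n => [("name", n), ("source_id", pyRget (sbn.getD n []) "id" ""),
                         ("target_id", pyRget (tbn.getD n []) "id" ""),
                         ("mode", pyRget (sbn.getD n []) "mode" "")])) := by
  induction ns generalizing a b c with
  | nil => simp
  | cons n ns ih =>
    rcases h1 : sbn.get? n with _ | s <;> rcases h2 : tbn.get? n with _ | t <;>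
      simp [classifyStep, h1, h2, ih, PySem.Dict.getD_eq_get?_getD]

theorem sorted_union_strict (sN tN : PySem.Set String) (hs : sN.Nodup) :
    (PySem.List.sorted (PySem.Set.union sN tN) (fun x => x) false).Pairwise (· < ·) := by
  have hnd : (PySem.Set.union sN tN).Nodup := PySem.Set.nodup_union sN tN hs
  have hperm := PySem.List.sorted_perm (PySem.Set.union sN tN) (fun x => x) false
  have hnd' := hperm.nodup_iff.mpr hnd
  have hle := PySem.List.sorted_pairwise (PySem.Set.union sN tN) (fun x => x)
  exact (hle.and hnd').imp (fun h => lt_of_le_of_ne h.1 h.2)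

-- filtering the sorted union by a membership predicate is the sort of the corresponding sub-set
theorem filter_sorted_union_eq (sN tN : PySem.Set String) (hs : sN.Nodup)
    (p : String → Bool) (rhs : List String) (hrnd : rhs.Nodup)
    (hmem : ∀ n, n ∈ rhs ↔ (n ∈ sN ∨ n ∈ tN) ∧ p n = true) :
    (PySem.List.sorted (PySem.Set.union sN tN) (fun x => x) false).filter p =
      PySem.List.sorted rhs (fun x => x) false := by
  have hlt : ((PySem.List.sorted (PySem.Set.union sN tN) (fun x => x) false).filter p).Pairwise (· < ·) :=
    (sorted_union_strict sN tN hs).filter p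
  have hnd : ((PySem.List.sorted (PySem.Set.union sN tN) (fun x => x) false).filter p).Nodup :=
    hlt.imp ne_of_lt
  have hperm : ((PySem.List.sorted (PySem.Set.union sN tN) (fun x => x) false).filter p).Perm rhs := by
    rw [List.perm_ext_iff_of_nodup hnd hrnd]
    intro n
    rw [List.mem_filter, PySem.List.mem_sorted, PySem.Set.mem_union, hmem]
  exact (PySem.List.sorted_eq_of_perm_of_pairwise_lt _ _ _ hperm hlt).symm

-- n has an entry in d iff n is among d's keys
theorem isSome_get?_keys (d : PySem.Dict String (List (String × String))) (n : String) :
    ((d.get? n).isSome = true) ↔ n ∈ d.keys := by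
  rw [Option.isSome_iff_ne_none, Ne, PySem.Dict.get?_eq_none_iff_not_mem_keys, not_not]

-- ===== VERDICT (by name: the statement is the Claim_ definition above) =====
theorem compare_resources_py_spec : Claim_equal_compare_resources_py := by
  intro src tgt _
  simp only [Spec_compare_resources_py, compare_resources_py, compare_resources_py_alt]
  have hsnd : (PySem.Set.ofList (byName src).keys).Nodup := PySem.Set.nodup_ofList _
  have htnd : (PySem.Set.ofList (byName tgt).keys).Nodup := PySem.Set.nodup_ofList _
  have hS : ∀ n, (((byName src).get? n).isSome = true) ↔ n ∈ (byName src).keys :=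
    isSome_get?_keys (byName src)
  have hT : ∀ n, (((byName tgt).get? n).isSome = true) ↔ n ∈ (byName tgt).keys :=
    isSome_get?_keys (byName tgt)
  have hSf : ∀ n, (((byName src).get? n).isSome = false) ↔ ¬ n ∈ (byName src).keys := by
    intro n; rw [← hS n]; cases ((byName src).get? n).isSome <;> simp
  have hTf : ∀ n, (((byName tgt).get? n).isSome = false) ↔ ¬ n ∈ (byName tgt).keys := by
    intro n; rw [← hT n]; cases ((byName tgt).get? n).isSome <;> simp
  rw [foldl_classifyStep,
      filter_sorted_union_eq (PySem.Set.ofList (byName src).keys) ((byName tgt).keys) hsnd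
        (fun n => (((byName src).get? n).isSome && !((byName tgt).get? n).isSome))
        (PySem.Set.diff (PySem.Set.ofList (byName src).keys) (PySem.Set.ofList (byName tgt).keys))
        (PySem.Set.nodup_diff _ _ hsnd)
        (by intro n
            simp only [PySem.Set.mem_diff, PySem.Set.mem_ofList, Bool.and_eq_true,
                       Bool.not_eq_true', hS, hTf]
            tauto),
      filter_sorted_union_eq (PySem.Set.ofList (byName src).keys) ((byName tgt).keys) hsnd
        (fun n => (!((byName src).get? n).isSome && ((byName tgt).get? n).isSome))
        (PySem.Set.diff (PySem.Set.ofList (byName tgt).keys) (PySem.Set.ofList (byName src).keys))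
        (PySem.Set.nodup_diff _ _ htnd)
        (by intro n
            simp only [PySem.Set.mem_diff, PySem.Set.mem_ofList, Bool.and_eq_true,
                       Bool.not_eq_true', hT, hSf]
            tauto),
      filter_sorted_union_eq (PySem.Set.ofList (byName src).keys) ((byName tgt).keys) hsnd
        (fun n => (((byName src).get? n).isSome && ((byName tgt).get? n).isSome))
        (PySem.Set.inter (PySem.Set.ofList (byName src).keys) (PySem.Set.ofList (byName tgt).keys))
        (PySem.Set.nodup_inter _ _ hsnd)
        (by intro n
            simp only [PySem.Set.mem_inter, PySem.Set.mem_ofList, Bool.and_eq_true, hS, hT]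
            tauto)]
  simp
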